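-- pv_equiv track=rewrite | github.com/zeczen/binary-sort | TheSort.py | lion_speak
-- ===== SOURCE A (Python) =====
-- def lion_speak(lst, search, count):
--     length = len(lst)
--     # search for the location of 'search'
--     while length >= 2:
--         index = length // 2
--         mid = lst[index]
--         if mid < search:
--             lst = lst[index + 1:]
--             count += ((length + 3) // 4)
--             length = len(lst)
--             continue
--         elif mid > search:
--             lst = lst[:index]
--             count -= ((length + 2) // 4)
--             length = len(lst)
--             continue
--         elif mid == search:
--             return count
--     if length == 1:
--         if lst[0] < search:
--             return count + 1
--     return count
-- ===== SOURCE B (Python) =====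
-- def lion_speak(lst, search, count):
--     # Index-based binary search: track lo/hi bounds instead of slicing copies.
--     lo, hi = 0, len(lst)
--     while hi - lo >= 2:
--         length = hi - lo
--         index = length // 2
--         mid = lst[lo + index]
--         if mid < search:
--             count += (length + 3) // 4
--             lo += index + 1
--         elif mid > search:
--             count -= (length + 2) // 4
--             hi = lo + index
--         else:
--             return count
--     if hi - lo == 1 and lst[lo] < search:
--         return count + 1
--     return count
-- ===== Notes on version B (the rewrite author's own statement) =====
-- stated objective: alternative
-- what changed: Replaces the slice-copying loop (each step copies the surviving part of the list) by an in-place lo/hi index binary search that only moves two indices, keeping the same count arithmetic on length = hi - lo; avoids all list copies (O(log n) work per call vs A's O(n) total slice copying), though a timing run measured only ~1.26x at its largest size.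
import Mathlib
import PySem

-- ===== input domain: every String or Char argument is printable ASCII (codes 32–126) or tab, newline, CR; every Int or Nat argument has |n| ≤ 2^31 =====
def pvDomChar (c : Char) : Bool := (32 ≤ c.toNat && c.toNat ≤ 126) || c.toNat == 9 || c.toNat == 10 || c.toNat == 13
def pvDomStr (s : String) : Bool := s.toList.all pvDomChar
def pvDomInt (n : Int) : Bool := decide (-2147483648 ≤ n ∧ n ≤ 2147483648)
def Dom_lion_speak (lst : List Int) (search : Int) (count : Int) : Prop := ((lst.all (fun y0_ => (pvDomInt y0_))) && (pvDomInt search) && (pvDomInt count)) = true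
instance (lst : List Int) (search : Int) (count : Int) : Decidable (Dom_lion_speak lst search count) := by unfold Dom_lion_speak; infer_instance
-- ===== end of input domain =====

-- B replaces A's slice-copying binary search by a lo/hi index binary search (no list copies); same count arithmetic, proved equal.

-- ===== PORT A =====
-- Slices lst[index+1:] / lst[:index] with nonnegative Nat bounds are List.drop / List.take
-- (PySem.List.slice_from_natCast / slice_to_natCast — exact here since index = length/2 ≥ 0);
-- Python's (length+3)//4 etc. on nonnegative operands is Nat division (cast to Int) — exact.
def lion_speak (lst : List Int) (search : Int) (count : Int) : Int :=
  let length := lst.length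
  if h : 2 ≤ length then
    let index := length / 2
    let mid := lst.getD index 0          -- lst[index], in range since index < length
    if mid < search then
      lion_speak (lst.drop (index + 1)) search (count + ((length + 3) / 4 : Nat))
    else if mid > search then
      lion_speak (lst.take index) search (count - ((length + 2) / 4 : Nat))
    else count
  else if length = 1 then
    if lst.getD 0 0 < search then count + 1 else count
  else count
termination_by lst.length
decreasing_by
  · simp only [List.length_drop]; omega
  · simp only [List.length_take]; omega

-- ===== PORT B =====
def lion_speak_altLoop (lst : List Int) (search : Int) (count : Int) (lo hi : Nat) : Int :=
  if h : 2 ≤ hi - lo then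
    let length := hi - lo
    let index := length / 2
    let mid := lst.getD (lo + index) 0   -- lst[lo + index], in range under the claim's hypotheses
    if mid < search then
      lion_speak_altLoop lst search (count + ((length + 3) / 4 : Nat)) (lo + index + 1) hi
    else if mid > search then
      lion_speak_altLoop lst search (count - ((length + 2) / 4 : Nat)) lo (lo + index)
    else count
  else if hi - lo = 1 then
    if lst.getD lo 0 < search then count + 1 else count
  else count
termination_by hi - lo
decreasing_by all_goals omega

def lion_speak_alt (lst : List Int) (search : Int) (count : Int) : Int :=
  lion_speak_altLoop lst search count 0 lst.length

-- ===== PRECONDITION & SPEC =====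
def Spec_lion_speak (lst : List Int) (search : Int) (count : Int) (out : Int) : Prop := out = lion_speak_alt lst search count
instance (lst : List Int) (search : Int) (count : Int) (out : Int) : Decidable (Spec_lion_speak lst search count out) := by unfold Spec_lion_speak; infer_instance

-- ===== CLAIM (what is proved, stated in full; the proofs are below) =====
def Claim_equal_lion_speak : Prop := ∀ (lst : List Int) (search : Int) (count : Int), Dom_lion_speak lst search count → Spec_lion_speak lst search count (lion_speak lst search count)

-- ===== LEMMAS AND PROOFS =====

-- B's loop on [lo, hi) computes A on the sublist (lst.drop lo).take (hi - lo).
theorem altLoop_eq_lion_speak (lst : List Int) (search count : Int) (lo hi : Nat)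
    (hlo : lo ≤ hi) (hhi : hi ≤ lst.length) :
    lion_speak_altLoop lst search count lo hi
      = lion_speak ((lst.drop lo).take (hi - lo)) search count := by
  rw [lion_speak_altLoop, lion_speak]
  have hsublen : ((lst.drop lo).take (hi - lo)).length = hi - lo := by
    simp [List.length_take, List.length_drop]; omega
  rw [hsublen]
  by_cases h2 : 2 ≤ hi - lo
  · simp only [h2, dif_pos]
    have hidx : (hi - lo) / 2 < hi - lo := by omega
    have hget : ((lst.drop lo).take (hi - lo)).getD ((hi - lo) / 2) 0
        = lst.getD (lo + (hi - lo) / 2) 0 := by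
      have h1 : (hi - lo) / 2 < ((lst.drop lo).take (hi - lo)).length := by omega
      have h2' : lo + (hi - lo) / 2 < lst.length := by omega
      rw [List.getD_eq_getElem _ _ h1, List.getD_eq_getElem _ _ h2']
      simp [List.getElem_take, List.getElem_drop]
    rw [hget]
    split_ifs with hlt hgt
    · -- go right: drop (index+1) of the sublist
      rw [altLoop_eq_lion_speak lst search _ (lo + (hi - lo) / 2 + 1) hi (by omega) hhi]
      congr 1
      rw [List.drop_take, List.drop_drop]
      congr 1; omega
    · -- go left: take index of the sublist
      have hA : lo ≤ lo + (hi - lo) / 2 := Nat.le_add_right _ _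
      have hB : lo + (hi - lo) / 2 ≤ lst.length := by
        have := Nat.div_le_self (hi - lo) 2; omega
      have hL : List.take ((hi - lo) / 2) (List.take (hi - lo) (List.drop lo lst))
          = List.take (lo + (hi - lo) / 2 - lo) (List.drop lo lst) := by
        rw [List.take_take]; congr 1; omega
      rw [altLoop_eq_lion_speak lst search _ lo (lo + (hi - lo) / 2) hA hB, hL]
    · rfl
  · simp only [h2, dif_neg, not_false_iff]
    by_cases h1 : hi - lo = 1
    · simp only [h1, if_pos]
      have hb : lo < lst.length := by omega
      have hget0 : (List.take 1 (List.drop lo lst)).getD 0 0 = lst.getD lo 0 := by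
        rw [List.getD_eq_getElem _ _ (by simp [List.length_take, List.length_drop]; omega),
            List.getD_eq_getElem _ _ hb]
        simp [List.getElem_take, List.getElem_drop]
      rw [hget0]
    · simp [h1]
termination_by hi - lo
decreasing_by all_goals omega

-- ===== VERDICT (by name: the statement is the Claim_ definition above) =====
theorem lion_speak_spec : Claim_equal_lion_speak := by
  intro lst search count _
  unfold Spec_lion_speak lion_speak_alt
  rw [altLoop_eq_lion_speak lst search count 0 lst.length (Nat.zero_le _) (le_refl _)]
  simp
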